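-- pv_equiv track=rewrite | github.com/Orange-135/CS5001-python | hw/hw08/ngrams/text_cleaner.py | sentence_to_word_list
-- ===== SOURCE A (Python) =====
-- def add_word_to_word_list(word_list, word):
--     word_list.append("".join(word))
--     word.clear()
--
-- def sentence_to_word_list(sentence):
--     word_list = []
--     word = []
--     for ch in sentence:
--         if ch.isalnum() or ch == "'":
--             word.append(ch)
--         elif ch == ",":
--             if word:
--                 add_word_to_word_list(word_list, word)
--             word_list.append("COMMA")
--         elif word:
--             add_word_to_word_list(word_list, word)
--     if word:
--         add_word_to_word_list(word_list, word)
--     return word_list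
-- ===== SOURCE B (Python) =====
-- def sentence_to_word_list(sentence):
--     out = []
--     i = 0
--     n = len(sentence)
--     while i < n:
--         ch = sentence[i]
--         if ch.isalnum() or ch == "'":
--             j = i + 1
--             while j < n and (sentence[j].isalnum() or sentence[j] == "'"):
--                 j += 1
--             out.append(sentence[i:j])
--             i = j
--         elif ch == ",":
--             out.append("COMMA")
--             i += 1
--         else:
--             i += 1
--     return out
-- ===== Notes on version B (the rewrite author's own statement) =====
-- stated objective: simpler
-- what changed: Replaced A's char-by-char word-buffer accumulator with flush-on-boundary helper by a span-based scan that emits each maximal word run as one slice, removing the buffer/flush state entirely.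
import Mathlib
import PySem

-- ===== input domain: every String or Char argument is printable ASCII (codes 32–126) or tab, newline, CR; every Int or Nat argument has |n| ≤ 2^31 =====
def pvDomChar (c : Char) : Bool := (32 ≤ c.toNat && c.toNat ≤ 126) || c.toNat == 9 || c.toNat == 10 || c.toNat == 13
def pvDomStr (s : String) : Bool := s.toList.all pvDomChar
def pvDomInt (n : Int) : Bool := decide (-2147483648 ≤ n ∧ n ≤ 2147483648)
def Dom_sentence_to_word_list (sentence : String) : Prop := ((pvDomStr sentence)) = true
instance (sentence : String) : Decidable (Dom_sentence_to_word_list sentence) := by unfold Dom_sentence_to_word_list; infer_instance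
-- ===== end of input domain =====

-- B replaces A's char-by-char buffer/flush accumulator with a span-based scan that cuts
-- each maximal word-run out in one slice (objective: simpler decomposition, same cost).

-- shared predicate: Python's "ch.isalnum() or ch == \"'\""
def isWordChar (ch : Char) : Bool := PySem.Chars.isalnum ch || ch = '\''

-- ===== PORT A =====
-- state = (word_list, word); add_word_to_word_list appends the joined buffer and clears it
def stepA (st : List String × List Char) (ch : Char) : List String × List Char :=
  let word_list := st.1
  let word := st.2
  if isWordChar ch then (word_list, word ++ [ch])
  else if ch = ',' then
    ((if word ≠ [] then word_list ++ [String.ofList word] else word_list) ++ ["COMMA"], [])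
  else if word ≠ [] then (word_list ++ [String.ofList word], [])
  else (word_list, word)

def finishA (st : List String × List Char) : List String :=
  if st.2 ≠ [] then st.1 ++ [String.ofList st.2] else st.1

def sentence_to_word_list (sentence : String) : List String :=
  finishA (sentence.toList.foldl stepA ([], []))

-- ===== PORT B =====
-- B scans: at a word char take the whole maximal run as one token (the inner while + slice),
-- at a comma emit "COMMA", otherwise skip.
def altGo : List Char → List String
  | [] => []
  | c :: cs =>
    if isWordChar c then
      String.ofList (c :: cs.takeWhile isWordChar) :: altGo (cs.dropWhile isWordChar)
    else if c = ',' then "COMMA" :: altGo cs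
    else altGo cs
  termination_by cs => cs.length
  decreasing_by
    · have := List.length_dropWhile_le isWordChar cs
      simp; omega
    · simp
    · simp

def sentence_to_word_list_alt (sentence : String) : List String :=
  altGo sentence.toList

-- ===== PRECONDITION & SPEC =====
def Spec_sentence_to_word_list (sentence : String) (out : List String) : Prop := out = sentence_to_word_list_alt sentence
instance (sentence : String) (out : List String) : Decidable (Spec_sentence_to_word_list sentence out) := by unfold Spec_sentence_to_word_list; infer_instance

-- ===== CLAIM (what is proved, stated in full; the proofs are below) =====
def Claim_equal_sentence_to_word_list : Prop := ∀ (sentence : String), Dom_sentence_to_word_list sentence → Spec_sentence_to_word_list sentence (sentence_to_word_list sentence)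

-- ===== LEMMAS AND PROOFS =====

-- stepA under each branch hypothesis
lemma stepA_word {c : Char} (hw : isWordChar c = true) (acc : List String) (buf : List Char) :
    stepA (acc, buf) c = (acc, buf ++ [c]) := by
  simp [stepA, hw]

lemma stepA_comma (acc : List String) (buf : List Char) :
    stepA (acc, buf) ',' = ((if buf ≠ [] then acc ++ [String.ofList buf] else acc) ++ ["COMMA"], []) := by
  have h : isWordChar ',' = false := by decide
  simp [stepA, h]

lemma stepA_other {c : Char} (hw : isWordChar c = false) (hc : c ≠ ',') (acc : List String) (buf : List Char) :
    stepA (acc, buf) c = if buf ≠ [] then (acc ++ [String.ofList buf], []) else (acc, buf) := by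
  simp [stepA, hw, hc]

-- the word_list accumulator threads through the fold: it can be pulled out front
lemma finishA_foldl_acc (cs : List Char) (acc : List String) (buf : List Char) :
    finishA (cs.foldl stepA (acc, buf)) = acc ++ finishA (cs.foldl stepA ([], buf)) := by
  induction cs generalizing acc buf with
  | nil =>
    unfold finishA
    by_cases hb : buf = [] <;> simp [hb]
  | cons c cs ih =>
    simp only [List.foldl_cons]
    by_cases hw : isWordChar c
    · simp only [stepA_word hw]
      exact ih acc (buf ++ [c])
    · rw [Bool.not_eq_true] at hw
      by_cases hc : c = ','
      · subst hc
        simp only [stepA_comma]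
        by_cases hb : buf = []
        · simp only [hb, ne_eq, not_true_eq_false, if_false, List.nil_append]
          rw [ih (acc ++ ["COMMA"]) [], ih ["COMMA"] []]
          simp
        · simp only [ne_eq, hb, not_false_eq_true, if_true, List.nil_append]
          rw [ih (acc ++ [String.ofList buf] ++ ["COMMA"]) [],
              ih ([String.ofList buf] ++ ["COMMA"]) []]
          simp
      · simp only [stepA_other hw hc]
        by_cases hb : buf = []
        · simp only [hb, ne_eq, not_true_eq_false, if_false]
          exact ih acc []
        · simp only [ne_eq, hb, not_false_eq_true, if_true, List.nil_append]
          rw [ih (acc ++ [String.ofList buf]) [], ih [String.ofList buf] []]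
          simp

-- altGo in span form (one unfolding)
lemma altGo_span (cs : List Char) :
    altGo cs = (if cs.takeWhile isWordChar = [] then []
                else [String.ofList (cs.takeWhile isWordChar)]) ++ altGo (cs.dropWhile isWordChar) := by
  cases cs with
  | nil => simp [altGo]
  | cons c cs =>
    by_cases hw : isWordChar c
    · rw [altGo]
      simp [hw]
    · rw [Bool.not_eq_true] at hw
      have ht : List.takeWhile isWordChar (c :: cs) = [] := by
        simp [hw]
      have hd : List.dropWhile isWordChar (c :: cs) = c :: cs := by
        simp [hw]
      rw [ht, hd]
      simp

-- the core invariant: A's fold from buffer `buf` = the pending token (buf ++ current run) then B's tail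
lemma main_inv (cs : List Char) (buf : List Char) :
    finishA (cs.foldl stepA ([], buf)) =
      (if buf ++ cs.takeWhile isWordChar = [] then []
       else [String.ofList (buf ++ cs.takeWhile isWordChar)]) ++ altGo (cs.dropWhile isWordChar) := by
  induction cs generalizing buf with
  | nil =>
    unfold finishA
    by_cases hb : buf = [] <;> simp [hb, altGo]
  | cons c cs ih =>
    simp only [List.foldl_cons]
    by_cases hw : isWordChar c
    · simp only [stepA_word hw]
      rw [ih (buf ++ [c])]
      simp [hw]
    · rw [Bool.not_eq_true] at hw
      by_cases hc : c = ','
      · subst hc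
        simp only [stepA_comma]
        rw [finishA_foldl_acc, ih []]
        simp only [List.nil_append]
        rw [← altGo_span cs]
        by_cases hb : buf = [] <;>
          simp [hb, altGo,
                show isWordChar ',' = false from by decide]
      · simp only [stepA_other hw hc]
        by_cases hb : buf = []
        · simp only [hb, ne_eq, not_true_eq_false, if_false]
          rw [ih []]
          simp only [List.nil_append]
          rw [← altGo_span cs]
          simp [altGo, hw, hc]
        · simp only [ne_eq, hb, not_false_eq_true, if_true]
          rw [finishA_foldl_acc, ih []]
          simp only [List.nil_append]
          rw [← altGo_span cs]
          simp [altGo, hw, hc, hb]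

-- ===== VERDICT (by name: the statement is the Claim_ definition above) =====
theorem sentence_to_word_list_spec : Claim_equal_sentence_to_word_list := by
  intro s _
  unfold Spec_sentence_to_word_list sentence_to_word_list sentence_to_word_list_alt
  rw [main_inv s.toList []]
  simp only [List.nil_append]
  rw [← altGo_span]
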